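-- pv_equiv track=rewrite | github.com/whsaik/Python_Developer | Code_Signal/Arcade/010_commonCharacterCount.py | solution
-- ===== SOURCE A (Python) =====
-- def solution(s1, s2):
--     d1 = dict()
--     d2 = dict()
--     results = []
--
--     for i in range(len(s1)):
--         if s1[i] not in d1:
--             d1[s1[i]] = 1
--         else:
--             d1[s1[i]] += 1
--
--     for i in range(len(s2)):
--         if s2[i] not in d2:
--             d2[s2[i]] = 1
--         else:
--             d2[s2[i]] += 1
--
--     if len(d1) > len(d2):
--         for k,v in d1.items():
--             if k in d2 and v > d2[k]:
--                 results.append(d2[k])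
--             elif k in d2 and v <= d2[k]:
--                 results.append(v)
--
--     elif len(d1) <= len(d2):
--         for k,v in d2.items():
--             if k in d1 and v > d1[k]:
--                 results.append(d1[k])
--             elif k in d1 and v <= d1[k]:
--                 results.append(v)
--
--     return sum(results)
-- ===== SOURCE B (Python) =====
-- def solution(s1, s2):
--     pool = list(s2)
--     matched = 0
--     for c in s1:
--         if c in pool:
--             pool.remove(c)
--             matched += 1
--     return matched
-- ===== Notes on version B (the rewrite author's own statement) =====
-- stated objective: alternative
-- what changed: Replaced A's two frequency dictionaries and size-comparing branch over dict items by greedy multiset matching: walk s1 once, and for each character remove one matching occurrence from a shrinking pool of s2's characters, counting successful removals (no counts or dictionaries at all).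
import Mathlib
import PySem

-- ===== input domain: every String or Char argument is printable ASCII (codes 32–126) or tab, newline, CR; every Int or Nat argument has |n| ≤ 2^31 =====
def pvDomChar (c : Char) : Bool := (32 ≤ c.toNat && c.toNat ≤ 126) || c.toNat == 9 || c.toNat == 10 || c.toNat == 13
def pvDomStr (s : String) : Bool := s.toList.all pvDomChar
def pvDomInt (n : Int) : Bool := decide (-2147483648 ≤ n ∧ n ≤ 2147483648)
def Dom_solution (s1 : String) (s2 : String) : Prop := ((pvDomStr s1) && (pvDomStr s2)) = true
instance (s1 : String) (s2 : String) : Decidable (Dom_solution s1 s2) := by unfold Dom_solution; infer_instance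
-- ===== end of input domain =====

-- B replaces A's two frequency dictionaries and branchy dict walk by greedy multiset matching
-- against a shrinking pool of s2's characters (alternative algorithm; not faster).

-- ===== PORT A =====
def solution (s1 : String) (s2 : String) : Int :=
  let d1 : PySem.Dict Char Int :=
    (PySem.List.pyRange 0 (PySem.Str.len s1) 1).foldl
      (fun d i =>
        if d.contains (PySem.List.pyGetD s1.toList i ' ') = false then
          d.insert (PySem.List.pyGetD s1.toList i ' ') 1
        else
          d.insert (PySem.List.pyGetD s1.toList i ' ')
            (d.getD (PySem.List.pyGetD s1.toList i ' ') 0 + 1))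
      PySem.Dict.empty
  let d2 : PySem.Dict Char Int :=
    (PySem.List.pyRange 0 (PySem.Str.len s2) 1).foldl
      (fun d i =>
        if d.contains (PySem.List.pyGetD s2.toList i ' ') = false then
          d.insert (PySem.List.pyGetD s2.toList i ' ') 1
        else
          d.insert (PySem.List.pyGetD s2.toList i ' ')
            (d.getD (PySem.List.pyGetD s2.toList i ' ') 0 + 1))
      PySem.Dict.empty
  let results : List Int :=
    if d1.size > d2.size then
      d1.items.foldl
        (fun acc kv =>
          if d2.contains kv.1 && decide (d2.getD kv.1 0 < kv.2) then acc ++ [d2.getD kv.1 0]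
          else if d2.contains kv.1 && decide (kv.2 ≤ d2.getD kv.1 0) then acc ++ [kv.2]
          else acc) []
    else if d1.size ≤ d2.size then
      d2.items.foldl
        (fun acc kv =>
          if d1.contains kv.1 && decide (d1.getD kv.1 0 < kv.2) then acc ++ [d1.getD kv.1 0]
          else if d1.contains kv.1 && decide (kv.2 ≤ d1.getD kv.1 0) then acc ++ [kv.2]
          else acc) []
    else []
  results.sum

-- ===== PORT B =====
-- pool.remove(c) is only reached under the guard 'c in pool', where Python's remove-first-
-- occurrence is exactly List.erase; state is the pair (pool, matched).
def solution_alt (s1 : String) (s2 : String) : Int :=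
  (s1.toList.foldl
    (fun (st : List Char × Int) c =>
      if st.1.contains c then (st.1.erase c, st.2 + 1) else st)
    (s2.toList, 0)).2

-- ===== PRECONDITION & SPEC =====
def Spec_solution (s1 : String) (s2 : String) (out : Int) : Prop := out = solution_alt s1 s2
instance (s1 : String) (s2 : String) (out : Int) : Decidable (Spec_solution s1 s2 out) := by unfold Spec_solution; infer_instance

-- ===== CLAIM (what is proved, stated in full; the proofs are below) =====
def Claim_equal_solution : Prop := ∀ (s1 : String) (s2 : String), Dom_solution s1 s2 → Spec_solution s1 s2 (solution s1 s2)

-- ===== LEMMAS AND PROOFS =====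

-- A's counting-loop body equals the standard counter-loop body
theorem build_body_eq (d : PySem.Dict Char Int) (c : Char) :
    (if d.contains c = false then d.insert c 1 else d.insert c (d.getD c 0 + 1))
      = d.insert c (d.getD c 0 + 1) := by
  cases h : d.contains c
  · simp [PySem.Dict.getD_of_not_contains d 0 h]
  · simp

theorem build_eq_counter (l : List Char) :
    (l.foldl (fun d c =>
        if d.contains c = false then d.insert c 1 else d.insert c (d.getD c 0 + 1))
      PySem.Dict.empty) = PySem.Dict.counter l := by
  rw [show (fun (d : PySem.Dict Char Int) (c : Char) =>
        if d.contains c = false then d.insert c 1 else d.insert c (d.getD c 0 + 1))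
      = (fun d c => d.insert c (d.getD c 0 + 1)) from funext fun d => funext fun c => build_body_eq d c]
  exact PySem.Dict.foldl_insert_getD_add_one_eq_counter l

-- A's results loop sums the pointwise min over the keys present in the other dict
theorem results_loop_sum (d : PySem.Dict Char Int) :
    ∀ (items : List (Char × Int)) (rs : List Int),
    (items.foldl
        (fun acc kv =>
          if d.contains kv.1 && decide (d.getD kv.1 0 < kv.2) then acc ++ [d.getD kv.1 0]
          else if d.contains kv.1 && decide (kv.2 ≤ d.getD kv.1 0) then acc ++ [kv.2]
          else acc) rs).sum
      = rs.sum + (items.map (fun kv => if d.contains kv.1 then min kv.2 (d.getD kv.1 0) else 0)).sum := by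
  intro items
  induction items with
  | nil => intro rs; simp
  | cons kv t ih =>
    intro rs
    rw [List.foldl_cons, List.map_cons, List.sum_cons]
    by_cases hc : d.contains kv.1
    · by_cases hlt : d.getD kv.1 0 < kv.2
      case neg =>
        have hle : kv.2 ≤ d.getD kv.1 0 := le_of_not_gt fun hgt => hlt hgt
        rw [show (if d.contains kv.1 && decide (d.getD kv.1 0 < kv.2) then rs ++ [d.getD kv.1 0]
              else if d.contains kv.1 && decide (kv.2 ≤ d.getD kv.1 0) then rs ++ [kv.2]
              else rs) = rs ++ [kv.2] from by simp [hc, hle, hlt]]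
        rw [ih (rs ++ [kv.2]), List.sum_append, if_pos hc, min_eq_left hle]
        simp; ring
      case pos =>
        rw [show (if d.contains kv.1 && decide (d.getD kv.1 0 < kv.2) then rs ++ [d.getD kv.1 0]
              else if d.contains kv.1 && decide (kv.2 ≤ d.getD kv.1 0) then rs ++ [kv.2]
              else rs) = rs ++ [d.getD kv.1 0] from by simp [hc, hlt]]
        rw [ih (rs ++ [d.getD kv.1 0]), List.sum_append, if_pos hc, min_eq_right (le_of_lt hlt)]
        simp; ring
    · rw [show (if d.contains kv.1 && decide (d.getD kv.1 0 < kv.2) then rs ++ [d.getD kv.1 0]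
            else if d.contains kv.1 && decide (kv.2 ≤ d.getD kv.1 0) then rs ++ [kv.2]
            else rs) = rs from by simp [hc]]
      rw [ih rs, if_neg hc]
      ring

theorem sum_map_if_zero (g : Char → Int) (p : Char → Bool) :
    ∀ (l : List Char),
    (l.map (fun k => if p k then g k else 0)).sum = ((l.filter p).map g).sum := by
  intro l
  induction l with
  | nil => simp
  | cons x t ih => by_cases h : p x <;> simp [h, ih]

-- the common-character sum is the same seen from either side
theorem filter_sum_symm (l1 l2 : List Char) (g : Char → Int) :
    (((PySem.Set.ofList l1).filter (fun k => l2.contains k)).map g).sum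
      = (((PySem.Set.ofList l2).filter (fun k => l1.contains k)).map g).sum := by
  have hperm : ((PySem.Set.ofList l1).filter (fun k => l2.contains k)).Perm
      ((PySem.Set.ofList l2).filter (fun k => l1.contains k)) := by
    rw [List.perm_ext_iff_of_nodup ((PySem.Set.nodup_ofList l1).filter _)
      ((PySem.Set.nodup_ofList l2).filter _)]
    intro a
    simp only [List.mem_filter, PySem.Set.mem_ofList, List.contains_iff_mem]
    tauto
  exact (hperm.map g).sum_eq

-- B's greedy pool loop computes the cardinality of the multiset intersection
theorem greedy_card (l1 : List Char) : ∀ (t : List Char) (acc : Int),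
    (l1.foldl
      (fun (st : List Char × Int) c =>
        if st.1.contains c then (st.1.erase c, st.2 + 1) else st)
      (t, acc)).2
      = acc + (Multiset.card ((↑l1 : Multiset Char) ∩ ↑t) : Int) := by
  induction l1 with
  | nil => intro t acc; simp
  | cons c l1 ih =>
    intro t acc
    by_cases h : c ∈ t
    · have hc : t.contains c = true := by simpa using h
      have hm : c ∈ (↑t : Multiset Char) := by simpa using h
      rw [List.foldl_cons]
      simp only [hc, if_true]
      rw [ih (t.erase c) (acc + 1)]
      rw [show ((↑(c :: l1) : Multiset Char) ∩ ↑t) = c ::ₘ ((↑l1 : Multiset Char) ∩ (↑t : Multiset Char).erase c) from by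
        rw [← Multiset.cons_coe]; exact Multiset.cons_inter_of_pos _ hm]
      rw [← Multiset.coe_erase]
      simp
      ring
    · have hc : t.contains c = false := by simpa using h
      have hm : c ∉ (↑t : Multiset Char) := by simpa using h
      rw [List.foldl_cons]
      simp only [hc, if_false, Bool.false_eq_true]
      rw [ih t acc]
      rw [show ((↑(c :: l1) : Multiset Char) ∩ ↑t) = (↑l1 : Multiset Char) ∩ ↑t from by
        rw [← Multiset.cons_coe]; exact Multiset.cons_inter_of_neg _ hm]

-- sum over a nodup list equals the Finset sum over its toFinset
theorem sum_map_nodup_toFinset (l : List Char) (h : l.Nodup) (f : Char → Nat) :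
    (l.map f).sum = l.toFinset.sum f := by
  induction l with
  | nil => simp
  | cons a t ih =>
    have hna : a ∉ t := (List.nodup_cons.mp h).1
    have hnt : t.Nodup := (List.nodup_cons.mp h).2
    rw [List.map_cons, List.sum_cons, ih hnt, List.toFinset_cons,
      Finset.sum_insert (by simpa using hna)]

-- A's filtered min-count sum is the cardinality of the multiset intersection
theorem filtered_min_sum_eq_card (l1 l2 : List Char) :
    (((PySem.Set.ofList l1).filter (fun k => l2.contains k)).map
      (fun k => min ((l1.count k : Int)) ((l2.count k : Int)))).sum
      = (Multiset.card ((↑l1 : Multiset Char) ∩ ↑l2) : Int) := by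
  set L : List Char := (PySem.Set.ofList l1).filter (fun k => l2.contains k) with hL
  have hnodup : L.Nodup := (PySem.Set.nodup_ofList l1).filter _
  have hcast : (L.map (fun k => min ((l1.count k : Int)) ((l2.count k : Int)))).sum
      = ((L.map (fun k => min (l1.count k) (l2.count k))).sum : Int) := by
    rw [Nat.cast_list_sum, List.map_map]
    apply congrArg
    apply List.map_congr_left
    intro k _
    simp [Nat.cast_min]
  rw [hcast, sum_map_nodup_toFinset L hnodup]
  have hset : L.toFinset = ((↑l1 : Multiset Char) ∩ ↑l2).toFinset := by
    ext a
    simp only [List.mem_toFinset, hL, List.mem_filter, PySem.Set.mem_ofList,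
      List.contains_iff_mem, Multiset.mem_toFinset, Multiset.mem_inter, Multiset.mem_coe]
  rw [hset]
  rw [show (((↑l1 : Multiset Char) ∩ ↑l2).toFinset.sum fun k => min (l1.count k) (l2.count k))
      = (((↑l1 : Multiset Char) ∩ ↑l2).toFinset.sum fun k =>
          Multiset.count k ((↑l1 : Multiset Char) ∩ ↑l2)) from by
    apply Finset.sum_congr rfl
    intro a _
    rw [Multiset.count_inter]
    simp]
  rw [Multiset.toFinset_sum_count_eq]

theorem solution_eq_alt (s1 s2 : String) : solution s1 s2 = solution_alt s1 s2 := by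
  have hbuild : ∀ (s : String),
      (PySem.List.pyRange 0 (PySem.Str.len s) 1).foldl
        (fun d i =>
          if d.contains (PySem.List.pyGetD s.toList i ' ') = false then
            d.insert (PySem.List.pyGetD s.toList i ' ') 1
          else
            d.insert (PySem.List.pyGetD s.toList i ' ')
              (d.getD (PySem.List.pyGetD s.toList i ' ') 0 + 1))
        PySem.Dict.empty = PySem.Dict.counter s.toList := by
    intro s
    rw [PySem.Str.len_eq]
    exact (PySem.List.foldl_pyRange_pyGetD' s.toList ' '
      (fun (d : PySem.Dict Char Int) c => if d.contains c = false then d.insert c 1 else d.insert c (d.getD c 0 + 1))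
      PySem.Dict.empty (le_refl 0)).trans (build_eq_counter s.toList)
  have hside : ∀ (la lb : List Char),
      ((PySem.Dict.counter la).items.foldl
        (fun acc kv =>
          if (PySem.Dict.counter lb).contains kv.1 && decide ((PySem.Dict.counter lb).getD kv.1 0 < kv.2) then
            acc ++ [(PySem.Dict.counter lb).getD kv.1 0]
          else if (PySem.Dict.counter lb).contains kv.1 && decide (kv.2 ≤ (PySem.Dict.counter lb).getD kv.1 0) then
            acc ++ [kv.2]
          else acc) ([] : List Int)).sum
      = (((PySem.Set.ofList la).filter (fun k => lb.contains k)).map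
          (fun k => min ((la.count k : Int)) ((lb.count k : Int)))).sum := by
    intro la lb
    rw [results_loop_sum (PySem.Dict.counter lb) (PySem.Dict.counter la).items []]
    rw [PySem.Dict.items_counter la, List.map_map]
    rw [show ((fun kv : Char × Int =>
          if (PySem.Dict.counter lb).contains kv.1 then min kv.2 ((PySem.Dict.counter lb).getD kv.1 0) else 0)
          ∘ (fun k : Char => (k, (la.count k : Int))))
        = (fun k : Char => if lb.contains k then min ((la.count k : Int)) ((lb.count k : Int)) else 0) from by
      funext k
      simp [PySem.Dict.contains_counter, PySem.Dict.getD_counter]]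
    rw [sum_map_if_zero (fun k => min ((la.count k : Int)) ((lb.count k : Int))) (fun k => lb.contains k)]
    simp
  have hB : solution_alt s1 s2 = (Multiset.card ((↑s1.toList : Multiset Char) ∩ ↑s2.toList) : Int) := by
    rw [solution_alt, greedy_card s1.toList s2.toList 0]
    ring
  simp only [solution]
  rw [hbuild s1, hbuild s2, hB]
  by_cases hsz : (PySem.Dict.counter s1.toList).size > (PySem.Dict.counter s2.toList).size
  · rw [if_pos hsz, hside s1.toList s2.toList, filtered_min_sum_eq_card]
  · rw [if_neg hsz, if_pos (le_of_not_gt hsz), hside s2.toList s1.toList]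
    rw [show (fun k : Char => min ((s2.toList.count k : Int)) ((s1.toList.count k : Int)))
        = (fun k : Char => min ((s1.toList.count k : Int)) ((s2.toList.count k : Int))) from by
      funext k; exact min_comm _ _]
    rw [filter_sum_symm s2.toList s1.toList, filtered_min_sum_eq_card]

-- ===== VERDICT (by name: the statement is the Claim_ definition above) =====
theorem solution_spec : Claim_equal_solution := by
  intro s1 s2 _
  unfold Spec_solution
  exact solution_eq_alt s1 s2
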